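-- pv_equiv track=rewrite | github.com/comkg/ProjectEuler | 315/315.py | get_smart_cnt
-- ===== SOURCE A (Python) =====
-- dig_map = {0: 6, 1: 2, 2: 5, 3: 5, 4: 4, 5: 5, 6: 6, 7: 4, 8: 7, 9: 6}
--
-- overlap_lap = {0: [6, 2, 4, 4, 3, 4, 5, 4, 6, 5],
--                1: [2, 2, 1, 2, 2, 1, 1, 2, 2, 2],
--                2: [4, 1, 5, 4, 2, 3, 4, 2, 5, 4],
--                3: [4, 2, 4, 5, 3, 4, 4, 3, 5, 5],
--                4: [3, 2, 2, 3, 4, 3, 3, 3, 4, 4],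
--                5: [4, 1, 3, 4, 3, 5, 5, 3, 5, 5],
--                6: [5, 1, 4, 4, 3, 5, 6, 3, 6, 5],
--                7: [4, 2, 2, 3, 3, 3, 3, 4, 4, 4],
--                8: [6, 2, 5, 5, 4, 5, 6, 4, 8, 6],
--                9: [5, 2, 4, 5, 4, 5, 5, 4, 6, 6]}
--
-- def get_num_cnt(n):
--     res = 0
--     while n > 0:
--         res += dig_map[n % 10]
--         n //= 10
--     return res
--
-- def get_overlap_cnt(x, y):
--     res = 0
--     while x > 0 and y > 0:
--         t_x = x % 10
--         t_y = y % 10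
--         res += overlap_lap[t_x][t_y]
--         x //= 10
--         y //= 10
--     return res
--
-- def get_smart_cnt(x):
--     res = 0
--     remain = 0
--     for idx, num in enumerate(x):
--         tem = get_num_cnt(num)
--         res += (tem - remain)
--         if idx < len(x) - 1:
--             remain = get_overlap_cnt(num, x[idx + 1])
--         else:
--             remain = 0
--         res += (tem - remain)
--     return res
-- ===== SOURCE B (Python) =====
-- # B: digit-list decomposition. Each number is first exploded into its list of
-- # decimal digits (least significant first); the per-number segment count is a
-- # sum of table lookups over that list, and the overlap of two consecutive
-- # numbers is a sum over the zip of their digit lists (zip truncates exactly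
-- # like A's `while x > 0 and y > 0`). Result = 2*(s1 - s2).
-- SEG = (6, 2, 5, 5, 4, 5, 6, 4, 7, 6)
-- OVL = (6, 2, 4, 4, 3, 4, 5, 4, 6, 5, 2, 2, 1, 2, 2, 1, 1, 2, 2, 2,
--        4, 1, 5, 4, 2, 3, 4, 2, 5, 4, 4, 2, 4, 5, 3, 4, 4, 3, 5, 5,
--        3, 2, 2, 3, 4, 3, 3, 3, 4, 4, 4, 1, 3, 4, 3, 5, 5, 3, 5, 5,
--        5, 1, 4, 4, 3, 5, 6, 3, 6, 5, 4, 2, 2, 3, 3, 3, 3, 4, 4, 4,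
--        6, 2, 5, 5, 4, 5, 6, 4, 8, 6, 5, 2, 4, 5, 4, 5, 5, 4, 6, 6)
--
-- def _digits(n):
--     ds = []
--     while n > 0:
--         ds.append(n % 10)
--         n //= 10
--     return ds
--
-- def get_smart_cnt(x):
--     digs = [_digits(n) for n in x]
--     s1 = sum(SEG[d] for ds in digs for d in ds)
--     s2 = sum(OVL[10 * a + b] for p, q in zip(digs, digs[1:]) for a, b in zip(p, q))
--     return 2 * (s1 - s2)
-- ===== Notes on version B (the rewrite author's own statement) =====
-- stated objective: alternative
-- what changed: B explodes every number into its decimal digit list once, then computes the total as 2*(sum of per-digit segment lookups minus sum of flat-table overlap lookups over zipped consecutive digit lists), replacing A's indexed loop that threads a 'remain' accumulator and its per-call while-loops over dict/nested-list tables.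
import Mathlib
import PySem

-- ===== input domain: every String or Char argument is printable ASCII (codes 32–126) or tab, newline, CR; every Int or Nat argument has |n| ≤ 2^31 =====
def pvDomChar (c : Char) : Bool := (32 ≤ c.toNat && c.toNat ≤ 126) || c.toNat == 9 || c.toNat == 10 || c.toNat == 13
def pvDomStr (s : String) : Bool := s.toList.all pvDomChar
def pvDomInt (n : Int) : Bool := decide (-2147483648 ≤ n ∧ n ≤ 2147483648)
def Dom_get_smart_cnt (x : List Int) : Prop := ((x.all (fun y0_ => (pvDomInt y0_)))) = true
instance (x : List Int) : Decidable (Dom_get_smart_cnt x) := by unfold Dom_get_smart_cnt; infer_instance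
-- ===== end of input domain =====

-- B explodes each number into its digit list once and sums table lookups over those
-- lists (2*(s1 - s2)), instead of A's indexed loop threading a 'remain' accumulator
-- with per-call while-loops; same cost, different decomposition.

-- ===== PORT A =====
-- dig_map / overlap_lap: the module's dicts with keys 0..9; lookups are always with a digit
-- (n % 10 of a positive n), so indexing the value lists with .getD is exact (KeyError unreachable).
def dig_map : List Int := [6, 2, 5, 5, 4, 5, 6, 4, 7, 6]

def overlap_lap : List (List Int) :=
  [[6, 2, 4, 4, 3, 4, 5, 4, 6, 5],
   [2, 2, 1, 2, 2, 1, 1, 2, 2, 2],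
   [4, 1, 5, 4, 2, 3, 4, 2, 5, 4],
   [4, 2, 4, 5, 3, 4, 4, 3, 5, 5],
   [3, 2, 2, 3, 4, 3, 3, 3, 4, 4],
   [4, 1, 3, 4, 3, 5, 5, 3, 5, 5],
   [5, 1, 4, 4, 3, 5, 6, 3, 6, 5],
   [4, 2, 2, 3, 3, 3, 3, 4, 4, 4],
   [6, 2, 5, 5, 4, 5, 6, 4, 8, 6],
   [5, 2, 4, 5, 4, 5, 5, 4, 6, 6]]

-- while n > 0: res += dig_map[n % 10]; n //= 10
def get_num_cnt_loop (res n : Int) : Int :=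
  if _h : 0 < n then
    get_num_cnt_loop (res + ((PySem.List.pyGet? dig_map (PySem.Int.mod n 10)).getD 0)) (PySem.Int.floordiv n 10)
  else res
termination_by n.toNat
decreasing_by
  rw [PySem.Int.floordiv_eq_ediv_of_pos (by norm_num)]
  omega

def get_num_cnt (n : Int) : Int := get_num_cnt_loop 0 n

-- while x > 0 and y > 0: res += overlap_lap[x % 10][y % 10]; x //= 10; y //= 10
def get_overlap_cnt_loop (res x y : Int) : Int :=
  if _h : 0 < x ∧ 0 < y then
    get_overlap_cnt_loop
      (res + ((PySem.List.pyGet? ((PySem.List.pyGet? overlap_lap (PySem.Int.mod x 10)).getD []) (PySem.Int.mod y 10)).getD 0))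
      (PySem.Int.floordiv x 10) (PySem.Int.floordiv y 10)
  else res
termination_by x.toNat
decreasing_by
  rw [PySem.Int.floordiv_eq_ediv_of_pos (by norm_num)]
  omega

def get_overlap_cnt (x y : Int) : Int := get_overlap_cnt_loop 0 x y

-- for idx, num in enumerate(x): … (index loop; x[idx+1] is read only when idx < len(x)-1, so in range)
def get_smart_cnt_loop (x : List Int) (i : Nat) (res remain : Int) : Int :=
  if h : i < x.length then
    let num := x[i]
    let tem := get_num_cnt num
    let res1 := res + (tem - remain)
    let remain1 := if (i : Int) < (x.length : Int) - 1
      then get_overlap_cnt num ((PySem.List.pyGet? x ((i : Int) + 1)).getD 0) else 0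
    get_smart_cnt_loop x (i + 1) (res1 + (tem - remain1)) remain1
  else res
termination_by x.length - i

def get_smart_cnt (x : List Int) : Int := get_smart_cnt_loop x 0 0 0

-- ===== PORT B =====
-- SEG / OVL: Source B's flat lookup tuples; indices are digits 0..9 (resp. 10*a+b ∈ 0..99),
-- so List.getD indexing is exact.
def pvSEG : List Int := [6, 2, 5, 5, 4, 5, 6, 4, 7, 6]

def pvOVL : List Int :=
  [6, 2, 4, 4, 3, 4, 5, 4, 6, 5, 2, 2, 1, 2, 2, 1, 1, 2, 2, 2,
   4, 1, 5, 4, 2, 3, 4, 2, 5, 4, 4, 2, 4, 5, 3, 4, 4, 3, 5, 5,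
   3, 2, 2, 3, 4, 3, 3, 3, 4, 4, 4, 1, 3, 4, 3, 5, 5, 3, 5, 5,
   5, 1, 4, 4, 3, 5, 6, 3, 6, 5, 4, 2, 2, 3, 3, 3, 3, 4, 4, 4,
   6, 2, 5, 5, 4, 5, 6, 4, 8, 6, 5, 2, 4, 5, 4, 5, 5, 4, 6, 6]

-- _digits: the loop runs only while 0 < n, where Python's % and // agree with
-- Lean's Int % and / (ediv/emod); least-significant digit first.
def pvDigits (n : Int) : List Int :=
  if _h : 0 < n then (n % 10) :: pvDigits (n / 10) else []
termination_by n.toNat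
decreasing_by omega

-- s1 = sum(SEG[d] for ds in digs for d in ds)
-- s2 = sum(OVL[10*a+b] for p, q in zip(digs, digs[1:]) for a, b in zip(p, q))
def get_smart_cnt_alt (x : List Int) : Int :=
  let digs := x.map pvDigits
  let s1 := (digs.map (fun ds => (ds.map (fun d => pvSEG.getD d.toNat 0)).sum)).sum
  let s2 := ((digs.zip (digs.drop 1)).map
      (fun pq => ((pq.1.zip pq.2).map (fun ab => pvOVL.getD (10 * ab.1 + ab.2).toNat 0)).sum)).sum
  2 * (s1 - s2)

-- ===== PRECONDITION & SPEC =====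
def Spec_get_smart_cnt (x : List Int) (out : Int) : Prop := out = get_smart_cnt_alt x
instance (x : List Int) (out : Int) : Decidable (Spec_get_smart_cnt x out) := by unfold Spec_get_smart_cnt; infer_instance

-- ===== CLAIM (what is proved, stated in full; the proofs are below) =====
def Claim_equal_get_smart_cnt : Prop := ∀ (x : List Int), Dom_get_smart_cnt x → Spec_get_smart_cnt x (get_smart_cnt x)

-- ===== LEMMAS AND PROOFS =====

-- B's per-number segment sum and per-pair overlap sum, as functions (for stating the bridges).
def segOf (n : Int) : Int := ((pvDigits n).map (fun d => pvSEG.getD d.toNat 0)).sum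

def ovlOf (a b : Int) : Int :=
  (((pvDigits a).zip (pvDigits b)).map (fun ab => pvOVL.getD (10 * ab.1 + ab.2).toNat 0)).sum

-- Table bridge: A's dict lookup at a digit = B's flat-list lookup.
lemma seg_lookup (d : Int) (h0 : 0 ≤ d) (h9 : d < 10) :
    (PySem.List.pyGet? dig_map d).getD 0 = pvSEG.getD d.toNat 0 := by
  interval_cases d <;> decide

lemma ovl_lookup (a b : Int) (ha0 : 0 ≤ a) (ha9 : a < 10) (hb0 : 0 ≤ b) (hb9 : b < 10) :
    (PySem.List.pyGet? ((PySem.List.pyGet? overlap_lap a).getD []) b).getD 0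
      = pvOVL.getD (10 * a + b).toNat 0 := by
  interval_cases a <;> interval_cases b <;> decide

-- A's digit-count loop computes B's segment sum.
lemma num_cnt_loop_eq (res n : Int) : get_num_cnt_loop res n = res + segOf n := by
  induction res, n using get_num_cnt_loop.induct with
  | case1 res n h ih =>
    rw [get_num_cnt_loop, dif_pos h]
    rw [ih]
    have hm := PySem.Int.mod_eq_emod_of_pos (a := n) (b := 10) (by norm_num)
    have hd := PySem.Int.floordiv_eq_ediv_of_pos (a := n) (b := 10) (by norm_num)
    have hdig : pvDigits n = (n % 10) :: pvDigits (n / 10) := by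
      rw [pvDigits, dif_pos h]
    unfold segOf
    conv_rhs => rw [hdig]
    rw [hm, hd, seg_lookup (n % 10) (by omega) (by omega)]
    simp only [List.map_cons, List.sum_cons]
    ring
  | case2 res n h =>
    rw [get_num_cnt_loop, dif_neg h]
    unfold segOf
    rw [pvDigits, dif_neg h]
    simp

lemma num_cnt_eq (n : Int) : get_num_cnt n = segOf n := by
  unfold get_num_cnt; rw [num_cnt_loop_eq]; ring

-- A's overlap loop computes B's zipped overlap sum.
lemma overlap_loop_eq (res x y : Int) :
    get_overlap_cnt_loop res x y = res + ovlOf x y := by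
  induction res, x, y using get_overlap_cnt_loop.induct with
  | case1 res x y h ih =>
    rw [get_overlap_cnt_loop, dif_pos h]
    rw [ih]
    obtain ⟨hx, hy⟩ := h
    have hmx := PySem.Int.mod_eq_emod_of_pos (a := x) (b := 10) (by norm_num)
    have hmy := PySem.Int.mod_eq_emod_of_pos (a := y) (b := 10) (by norm_num)
    have hdx := PySem.Int.floordiv_eq_ediv_of_pos (a := x) (b := 10) (by norm_num)
    have hdy := PySem.Int.floordiv_eq_ediv_of_pos (a := y) (b := 10) (by norm_num)
    have hdigx : pvDigits x = (x % 10) :: pvDigits (x / 10) := by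
      rw [pvDigits, dif_pos hx]
    have hdigy : pvDigits y = (y % 10) :: pvDigits (y / 10) := by
      rw [pvDigits, dif_pos hy]
    unfold ovlOf
    conv_rhs => rw [hdigx, hdigy]
    rw [hmx, hmy, hdx, hdy,
      ovl_lookup (x % 10) (y % 10) (by omega) (by omega) (by omega) (by omega)]
    simp only [List.zip_cons_cons, List.map_cons, List.sum_cons]
    ring
  | case2 res x y h =>
    rw [get_overlap_cnt_loop, dif_neg h]
    unfold ovlOf
    rcases (not_and_or.mp h) with hx | hy
    · have h0 : pvDigits x = [] := by rw [pvDigits, dif_neg hx]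
      rw [h0]; simp
    · have h0 : pvDigits y = [] := by rw [pvDigits, dif_neg hy]
      rw [h0]
      cases hx : pvDigits x <;> simp

lemma overlap_eq (x y : Int) : get_overlap_cnt x y = ovlOf x y := by
  unfold get_overlap_cnt; rw [overlap_loop_eq]; ring

-- Closed form of A's main loop over the remaining suffix.
def auxF : List Int → Int → Int
  | [], _ => 0
  | n :: t, r =>
    let r' := match t with | [] => 0 | m :: _ => get_overlap_cnt n m
    2 * get_num_cnt n - r - r' + auxF t r'

lemma loop_eq_auxF (x : List Int) :
    ∀ (n i : Nat) (res remain : Int), x.length - i ≤ n →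
      get_smart_cnt_loop x i res remain = res + auxF (x.drop i) remain := by
  intro n
  induction n with
  | zero =>
    intro i res remain hle
    have hge : x.length ≤ i := by omega
    rw [get_smart_cnt_loop, dif_neg (by omega), List.drop_eq_nil_of_le hge]
    simp [auxF]
  | succ n ih =>
    intro i res remain hle
    by_cases hi : i < x.length
    · rw [get_smart_cnt_loop, dif_pos hi]
      have hdrop : x.drop i = x[i] :: x.drop (i + 1) := List.drop_eq_getElem_cons hi
      by_cases hnext : i + 1 < x.length
      · have hdrop2 : x.drop (i + 1) = x[i+1] :: x.drop (i + 2) := List.drop_eq_getElem_cons hnext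
        have hget : PySem.List.pyGet? x ((i : Int) + 1) = some x[i+1] := by
          have hc : ((i : Int) + 1) = ((i + 1 : Nat) : Int) := by push_cast; ring
          rw [hc, PySem.List.pyGet?_natCast, List.getElem?_eq_getElem hnext]
        have ha : auxF (x.drop i) remain
            = 2 * get_num_cnt x[i] - remain - get_overlap_cnt x[i] x[i+1]
              + auxF (x[i+1] :: x.drop (i + 2)) (get_overlap_cnt x[i] x[i+1]) := by
          rw [hdrop, hdrop2]; rfl
        rw [ih (i + 1) _ _ (by omega), ha,
          if_pos (show (i : Int) < (x.length : Int) - 1 by omega), hget, hdrop2]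
        simp only [Option.getD_some]
        ring
      · have hdrop2 : x.drop (i + 1) = [] := List.drop_eq_nil_of_le (by omega)
        have ha : auxF (x.drop i) remain = 2 * get_num_cnt x[i] - remain - 0 + auxF [] 0 := by
          rw [hdrop, hdrop2]; rfl
        rw [ih (i + 1) _ _ (by omega), ha,
          if_neg (show ¬ (i : Int) < (x.length : Int) - 1 by omega), hdrop2]
        simp only [auxF]
        ring
    · rw [get_smart_cnt_loop, dif_neg hi, List.drop_eq_nil_of_le (by omega)]
      simp [auxF]

lemma auxF_closed : ∀ (l : List Int) (r : Int),
    auxF l r = 2 * (l.map get_num_cnt).sum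
      - 2 * ((l.zip (l.drop 1)).map (fun p => get_overlap_cnt p.1 p.2)).sum
      - (if l.isEmpty then 0 else r) := by
  intro l
  induction l with
  | nil => intro r; simp [auxF]
  | cons a t ih =>
    intro r
    cases t with
    | nil => simp [auxF]
    | cons m t' =>
      have h1 : auxF (a :: m :: t') r
          = 2 * get_num_cnt a - r - get_overlap_cnt a m + auxF (m :: t') (get_overlap_cnt a m) := rfl
      rw [h1, ih]
      simp [List.zip]
      ring

-- B's result written with A's helper functions.
lemma alt_closed (x : List Int) :
    get_smart_cnt_alt x = 2 * (x.map get_num_cnt).sum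
      - 2 * ((x.zip (x.drop 1)).map (fun p => get_overlap_cnt p.1 p.2)).sum := by
  unfold get_smart_cnt_alt
  simp only [← List.map_drop, List.zip_map, List.map_map]
  have h1 : x.map ((fun ds => (ds.map (fun d => pvSEG.getD d.toNat 0)).sum) ∘ pvDigits)
      = x.map get_num_cnt := by
    apply List.map_congr_left; intro a _; exact (num_cnt_eq a).symm
  have h2 : (x.zip (x.drop 1)).map
        ((fun pq : List Int × List Int =>
            ((pq.1.zip pq.2).map (fun ab => pvOVL.getD (10 * ab.1 + ab.2).toNat 0)).sum)
          ∘ Prod.map pvDigits pvDigits)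
      = (x.zip (x.drop 1)).map (fun p => get_overlap_cnt p.1 p.2) := by
    apply List.map_congr_left; intro p _
    obtain ⟨a, b⟩ := p
    exact (overlap_eq a b).symm
  rw [h1, h2]; ring

-- ===== VERDICT (by name: the statement is the Claim_ definition above) =====
theorem get_smart_cnt_spec : Claim_equal_get_smart_cnt := by
  intro x _
  unfold Spec_get_smart_cnt get_smart_cnt
  rw [loop_eq_auxF x x.length 0 0 0 (by omega), List.drop_zero, auxF_closed, alt_closed]
  cases x <;> simp
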